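-- pv_equiv track=rewrite | github.com/cauanicastro/Prog1Ifes | biblioteca.py | separaPal
-- ===== SOURCE A (Python) =====
-- def separaPal(texto):
--     lista = []
--     #diferentes teclados podem ter diferentes inputs aceitos como "aspas". Incluindo todos eles.
--     aspas = ["'", '"', "`"]
--     aux = ""
--     citacao = False
--     for i in texto:
--         if not i.isalnum():
--             if citacao:
--                 if i == citacao:
--                     aux += i
--                     citacao = False
--                     lista.append(aux)
--                     aux = ""
--                 else:
--                     aux += i
--             else:
--                 if aux:
--                     lista.append(aux)
--                     aux = ""
--                 if i in aspas:
--                     citacao = i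
--                     aux = i
--         else:
--             aux += i
--     if aux:
--         lista.append(aux)
--     return lista
-- ===== SOURCE B (Python) =====
-- def separaPal(texto):
--     aspas = "'\"`"
--     lista = []
--     n = len(texto)
--     i = 0
--     while i < n:
--         c = texto[i]
--         if c.isalnum():
--             j = i + 1
--             while j < n and texto[j].isalnum():
--                 j += 1
--             lista.append(texto[i:j])
--             i = j
--         elif c in aspas:
--             k = texto.find(c, i + 1)
--             if k == -1:
--                 lista.append(texto[i:])
--                 i = n
--             else:
--                 lista.append(texto[i:k + 1])
--                 i = k + 1
--         else:
--             i += 1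
--     return lista
-- ===== Notes on version B (the rewrite author's own statement) =====
-- stated objective: alternative
-- what changed: A is a char-by-char state machine carrying an accumulator string and a quote flag; B scans with an explicit index, emitting each maximal alphanumeric run and each quote-to-matching-quote segment (via str.find) as a whole slice.
import Mathlib
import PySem

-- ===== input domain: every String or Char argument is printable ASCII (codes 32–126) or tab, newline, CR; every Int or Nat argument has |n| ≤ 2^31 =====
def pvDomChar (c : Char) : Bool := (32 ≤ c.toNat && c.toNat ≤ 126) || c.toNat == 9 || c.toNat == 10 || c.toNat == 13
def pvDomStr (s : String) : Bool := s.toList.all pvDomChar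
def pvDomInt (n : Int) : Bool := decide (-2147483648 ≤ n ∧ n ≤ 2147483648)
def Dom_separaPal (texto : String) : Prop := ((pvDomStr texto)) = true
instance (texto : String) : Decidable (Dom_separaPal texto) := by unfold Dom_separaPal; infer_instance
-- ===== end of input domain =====

-- B replaces A's char-by-char accumulator/flag state machine by an index-jumping
-- scanner (maximal alnum runs and quote-to-quote segments taken as whole slices);
-- same cost, different structure ("alternative").

-- ===== PORT A =====
-- state = (lista, aux, citacao); citacao : Option Char is Python's False / quote char
def pvStepA (st : List String × List Char × Option Char) (i : Char) :
    List String × List Char × Option Char :=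
  match st with
  | (lista, aux, cit) =>
    if ¬ (PySem.Chars.isalnum i) then
      match cit with
      | some q =>
        if i = q then (lista ++ [String.ofList (aux ++ [i])], [], none)
        else (lista, aux ++ [i], some q)
      | none =>
        let p := if aux ≠ [] then (lista ++ [String.ofList aux], ([] : List Char)) else (lista, aux)
        if i = '\'' ∨ i = '"' ∨ i = '`' then (p.1, [i], some i)
        else (p.1, p.2, none)
    else (lista, aux ++ [i], cit)

def separaPal (texto : String) : List String :=
  let st := texto.toList.foldl pvStepA ([], [], none)
  if st.2.1 ≠ [] then st.1 ++ [String.ofList st.2.1] else st.1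

-- ===== PORT B =====
-- Source B's index-jumping while loop as recursion over the remaining characters;
-- `texto.find(c, i+1)` (a single-char needle) is ported as `rest.idxOf? c`
-- (none = -1), and the slices texto[i:j] / texto[i:k+1] are the corresponding
-- take/drop of the remainder.
def pvGoB : List Char → List String
  | [] => []
  | c :: rest =>
    if PySem.Chars.isalnum c then
      String.ofList (c :: rest.takeWhile PySem.Chars.isalnum) ::
        pvGoB (rest.dropWhile PySem.Chars.isalnum)
    else if c = '\'' ∨ c = '"' ∨ c = '`' then
      match rest.idxOf? c with
      | none => [String.ofList (c :: rest)]
      | some k => String.ofList (c :: rest.take (k + 1)) :: pvGoB (rest.drop (k + 1))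
    else pvGoB rest
termination_by l => l.length
decreasing_by
  · simp [Nat.lt_succ_of_le (List.length_dropWhile_le _ _)]
  · simpa using Nat.lt_succ_of_le (List.length_drop_le _ _)
  · simp

def separaPal_alt (texto : String) : List String := pvGoB texto.toList

-- ===== PRECONDITION & SPEC =====
def Spec_separaPal (texto : String) (out : List String) : Prop := out = separaPal_alt texto
instance (texto : String) (out : List String) : Decidable (Spec_separaPal texto out) := by unfold Spec_separaPal; infer_instance

-- ===== CLAIM (what is proved, stated in full; the proofs are below) =====
def Claim_equal_separaPal : Prop := ∀ (texto : String), Dom_separaPal texto → Spec_separaPal texto (separaPal texto)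

-- ===== LEMMAS AND PROOFS =====

-- expected continuation of A's fold from state (aux, cit), phrased with B's scanner
def pvCont (aux : List Char) (cit : Option Char) (l : List Char) : List String :=
  match cit with
  | some q =>
    match l.idxOf? q with
    | none => [String.ofList (aux ++ l)]
    | some k => String.ofList (aux ++ l.take (k + 1)) :: pvGoB (l.drop (k + 1))
  | none =>
    if aux = [] then pvGoB l
    else String.ofList (aux ++ l.takeWhile PySem.Chars.isalnum) ::
      pvGoB (l.dropWhile PySem.Chars.isalnum)

def pvFinish (st : List String × List Char × Option Char) : List String :=
  if st.2.1 ≠ [] then st.1 ++ [String.ofList st.2.1] else st.1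


lemma pvGoB_skip {c : Char} (rest : List Char) (hal : PySem.Chars.isalnum c = false)
    (hq : ¬ (c = '\'' ∨ c = '"' ∨ c = '`')) : pvGoB (c :: rest) = pvGoB rest := by
  rw [pvGoB]; simp [hal, hq]

lemma pvGoB_quote {c : Char} (rest : List Char) (hal : PySem.Chars.isalnum c = false)
    (hq : c = '\'' ∨ c = '"' ∨ c = '`') : pvGoB (c :: rest) = pvCont [c] (some c) rest := by
  rw [pvGoB]; simp only [hal, Bool.false_eq_true, if_false, hq, if_true, pvCont]
  cases rest.idxOf? c <;> simp

lemma pvGoB_alnum {c : Char} (rest : List Char) (hal : PySem.Chars.isalnum c = true) :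
    pvGoB (c :: rest) = String.ofList (c :: rest.takeWhile PySem.Chars.isalnum) ::
      pvGoB (rest.dropWhile PySem.Chars.isalnum) := by
  rw [pvGoB]; simp [hal]

lemma pvMain : ∀ (l : List Char) (lista : List String) (aux : List Char) (cit : Option Char),
    (∀ q, cit = some q → PySem.Chars.isalnum q = false ∧ aux ≠ []) →
    pvFinish (l.foldl pvStepA (lista, aux, cit)) = lista ++ pvCont aux cit l := by
  intro l
  induction l with
  | nil =>
    intro lista aux cit hinv
    cases cit with
    | none => by_cases h : aux = [] <;> simp [pvFinish, pvCont, h, pvGoB]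
    | some q => simp [pvFinish, pvCont, (hinv q rfl).2]
  | cons c rest IH =>
    intro lista aux cit hinv
    simp only [List.foldl_cons]
    by_cases hal : PySem.Chars.isalnum c = true
    · rw [show pvStepA (lista, aux, cit) c = (lista, aux ++ [c], cit) from by
        simp [pvStepA, hal]]
      rw [IH lista (aux ++ [c]) cit (by intro q hq; exact ⟨(hinv q hq).1, by simp⟩)]
      congr 1
      cases cit with
      | none =>
        by_cases h : aux = [] <;>
          simp [pvCont, h, pvGoB_alnum rest hal, hal]
      | some q =>
        have hqa : PySem.Chars.isalnum q = false := (hinv q rfl).1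
        have hcq : ¬ (c = q) := fun h => by rw [h] at hal; rw [hal] at hqa; cases hqa
        simp only [pvCont, List.idxOf?_cons, beq_iff_eq, hcq, if_false]
        cases h : rest.idxOf? q with
        | none => simp
        | some k => simp [List.take_succ_cons, List.drop_succ_cons]
    · rw [Bool.not_eq_true] at hal
      cases cit with
      | some q =>
        have hqa : PySem.Chars.isalnum q = false := (hinv q rfl).1
        have haux : aux ≠ [] := (hinv q rfl).2
        by_cases hcq : c = q
        · subst hcq
          rw [show pvStepA (lista, aux, some c) c
              = (lista ++ [String.ofList (aux ++ [c])], [], none) from by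
            simp [pvStepA, hal]]
          rw [IH _ [] none (by simp)]
          simp [pvCont, List.idxOf?_cons]
        · rw [show pvStepA (lista, aux, some q) c = (lista, aux ++ [c], some q) from by
            simp [pvStepA, hal, hcq]]
          rw [IH lista (aux ++ [c]) (some q) (by intro p hp; cases hp; exact ⟨hqa, by simp⟩)]
          congr 1
          simp only [pvCont, List.idxOf?_cons, beq_iff_eq, hcq, if_false]
          cases h : rest.idxOf? q with
          | none => simp
          | some k => simp [List.take_succ_cons, List.drop_succ_cons]
      | none =>
        by_cases hq : c = '\'' ∨ c = '"' ∨ c = '`'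
        · rw [show pvStepA (lista, aux, none) c
              = ((if aux ≠ [] then lista ++ [String.ofList aux] else lista), [c], some c) from by
            by_cases h : aux = [] <;> simp [pvStepA, hal, hq, h]]
          rw [IH _ [c] (some c) (by intro p hp; cases hp; exact ⟨hal, by simp⟩)]
          by_cases h : aux = []
          · simp only [h, ne_eq, not_true_eq_false, if_false]
            congr 1
            rw [show pvCont [] none (c :: rest) = pvGoB (c :: rest) from by simp [pvCont],
              pvGoB_quote rest hal hq]
          · simp only [ne_eq, h, not_false_eq_true, if_true]
            rw [← pvGoB_quote rest hal hq]
            simp [pvCont, h, hal]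
        · rw [show pvStepA (lista, aux, none) c
              = ((if aux ≠ [] then lista ++ [String.ofList aux] else lista), [], none) from by
            by_cases h : aux = [] <;> simp [pvStepA, hal, hq, h]]
          rw [IH _ [] none (by simp)]
          by_cases h : aux = [] <;>
            simp [pvCont, h, hal, pvGoB_skip rest hal hq]

theorem separaPal_spec : Claim_equal_separaPal := by
  intro texto _
  unfold Spec_separaPal separaPal separaPal_alt
  have h := pvMain texto.toList [] [] none (by simp)
  simp only [pvFinish, pvCont, List.nil_append] at h
  exact h
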